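-- pv_equiv track=rewrite | github.com/malcolm-smith/1405-practice | psets/06/04-largest-volume/musa-ali/pset6p4.py | max_volume
-- ===== SOURCE A (Python) =====
-- def max_volume(nums):
-- 	volumes = []
-- 	for box in nums:
-- 		volumes.append(box[0]*box[1]*box[2])
--
-- 	maximum = volumes[0]
-- 	for volume in volumes:
-- 		if volume > maximum:
-- 			maximum = volume
--
-- 	return maximum
-- ===== SOURCE B (Python) =====
-- def max_volume(nums):
--     vols = sorted(box[0] * box[1] * box[2] for box in nums)
--     return vols[-1]
-- ===== Notes on version B (the rewrite author's own statement) =====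
-- stated objective: alternative
-- what changed: Replaces the build-a-volume-list-then-linear-max-scan with a sort of the volumes followed by taking the last (largest) element.
import Mathlib
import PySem

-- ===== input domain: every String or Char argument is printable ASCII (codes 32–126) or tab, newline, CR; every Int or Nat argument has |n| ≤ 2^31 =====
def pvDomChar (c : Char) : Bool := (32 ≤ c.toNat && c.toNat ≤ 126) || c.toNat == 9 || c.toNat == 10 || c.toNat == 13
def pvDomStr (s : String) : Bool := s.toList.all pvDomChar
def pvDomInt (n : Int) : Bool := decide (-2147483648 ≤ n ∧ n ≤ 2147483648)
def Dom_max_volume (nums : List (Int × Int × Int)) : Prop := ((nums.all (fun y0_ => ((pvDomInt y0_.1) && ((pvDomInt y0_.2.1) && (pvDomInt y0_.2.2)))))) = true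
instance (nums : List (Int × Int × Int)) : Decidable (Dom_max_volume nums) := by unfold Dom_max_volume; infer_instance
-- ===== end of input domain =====

-- B replaces the volume-list + linear max-scan with sort-the-volumes-then-take-last; same result, no speed claim.
-- Both programs raise IndexError on the empty list, excluded by Pre_.

-- ===== PORT A =====
def max_volume (nums : List (Int × Int × Int)) : Int :=
  let volumes := nums.foldl (fun acc box => acc ++ [box.1 * box.2.1 * box.2.2]) []
  match PySem.List.pyGet? volumes 0 with
  | some m => volumes.foldl (fun maximum volume => if volume > maximum then volume else maximum) m
  | none => 0  -- IndexError on empty input; excluded by Pre_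

-- ===== PORT B =====
def max_volume_alt (nums : List (Int × Int × Int)) : Int :=
  let vols := PySem.List.sorted (nums.map (fun box => box.1 * box.2.1 * box.2.2)) (fun x => x) false
  match PySem.List.pyGet? vols (-1) with
  | some v => v
  | none => 0  -- IndexError on empty input; excluded by Pre_

-- ===== PRECONDITION & SPEC =====
-- Pre_ excludes only the empty list, on which both programs raise IndexError.
def Pre_max_volume (nums : List (Int × Int × Int)) : Prop := nums ≠ []
instance (nums : List (Int × Int × Int)) : Decidable (Pre_max_volume nums) := by unfold Pre_max_volume; infer_instance
def pvWitness_max_volume : (List (Int × Int × Int)) := [(1, 2, 3)]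

def Spec_max_volume (nums : List (Int × Int × Int)) (out : Int) : Prop := out = max_volume_alt nums
instance (nums : List (Int × Int × Int)) (out : Int) : Decidable (Spec_max_volume nums out) := by unfold Spec_max_volume; infer_instance

-- ===== CLAIM (what is proved, stated in full; the proofs are below) =====
def Claim_equal_max_volume : Prop := ∀ (nums : List (Int × Int × Int)), Dom_max_volume nums → Pre_max_volume nums → Spec_max_volume nums (max_volume nums)

-- ===== LEMMAS AND PROOFS =====

-- A's scan starting from m returns an element of (m :: l) that is ≥ every element of l and ≥ m.
theorem foldl_scan_spec (l : List Int) (m : Int) :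
    (l.foldl (fun maximum volume => if volume > maximum then volume else maximum) m = m ∨
     l.foldl (fun maximum volume => if volume > maximum then volume else maximum) m ∈ l) ∧
    m ≤ l.foldl (fun maximum volume => if volume > maximum then volume else maximum) m ∧
    ∀ x ∈ l, x ≤ l.foldl (fun maximum volume => if volume > maximum then volume else maximum) m := by
  induction l generalizing m with
  | nil => simp
  | cons a t ih =>
    simp only [List.foldl_cons]
    by_cases h : a > m
    · simp only [if_pos h]
      obtain ⟨hmem, hle, hall⟩ := ih a
      refine ⟨?_, by omega, ?_⟩
      · rcases hmem with h' | h' <;> simp [h']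
      · intro x hx
        rcases List.mem_cons.mp hx with rfl | hx
        · exact hle
        · exact hall x hx
    · simp only [if_neg h]
      obtain ⟨hmem, hle, hall⟩ := ih m
      refine ⟨?_, hle, ?_⟩
      · rcases hmem with h' | h' <;> simp [h']
      · intro x hx
        rcases List.mem_cons.mp hx with rfl | hx
        · omega
        · exact hall x hx

-- The last element of a ≤-sorted list bounds every element.
theorem getLast_pairwise_ge (l : List Int) (h : l ≠ []) (hp : l.Pairwise (· ≤ ·)) :
    ∀ x ∈ l, x ≤ l.getLast h := by
  induction l with
  | nil => simp at h
  | cons a t ih =>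
    intro x hx
    rcases List.pairwise_cons.mp hp with ⟨ha, hpt⟩
    cases t with
    | nil => simp at hx; simp [hx, List.getLast]
    | cons b u =>
      have hlast : (a :: b :: u).getLast h = (b :: u).getLast (by simp) := by
        simp [List.getLast]
      rw [hlast]
      rcases List.mem_cons.mp hx with rfl | hx
      · exact le_trans (ha _ (List.getLast_mem _)) (le_refl _)
      · exact ih (by simp) hpt x hx

-- ===== VERDICT =====
theorem max_volume_spec : Claim_equal_max_volume := by
  intro nums _ hpre
  unfold Spec_max_volume max_volume max_volume_alt
  simp only [PySem.List.foldl_append_singleton_eq_map, List.nil_append]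
  set l := nums.map (fun box => box.1 * box.2.1 * box.2.2) with hl
  clear_value l
  have hne : l ≠ [] := by
    simp [hl]; exact hpre
  set s := PySem.List.sorted l (fun x => x) false with hs
  have hsne : s ≠ [] := by
    intro h
    have := PySem.List.sorted_perm (xs := l) (key := fun x => x) (rev := false)
    rw [← hs, h] at this
    exact hne (this.nil_eq).symm
  obtain ⟨a, t, rfl⟩ := List.exists_cons_of_ne_nil hne
  have hget0 : PySem.List.pyGet? (a :: t) (0 : Int) = some a := by
    simp [PySem.List.pyGet?, PySem.List.pyIdx?]
  rw [hget0]
  have hgetl : PySem.List.pyGet? s (-1) = some (s.getLast hsne) := by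
    rw [PySem.List.pyGet?_neg_one, List.getLast?_eq_some_getLast]
  rw [hgetl]
  show (a :: t).foldl (fun maximum volume => if volume > maximum then volume else maximum) a = s.getLast hsne
  -- both sides are the maximum of a :: t
  have hperm : s.Perm (a :: t) := PySem.List.sorted_perm _ _ _
  have hpair : s.Pairwise (fun x y => x ≤ y) := by
    have := PySem.List.sorted_pairwise (xs := a :: t) (key := fun x => x)
    simpa [← hs] using this
  have hBmem : s.getLast hsne ∈ (a :: t) := hperm.mem_iff.mp (List.getLast_mem hsne)
  have hBmax : ∀ x ∈ (a :: t), x ≤ s.getLast hsne := by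
    intro x hx
    exact getLast_pairwise_ge s hsne hpair x (hperm.mem_iff.mpr hx)
  obtain ⟨hAmem, hAge, hAmax⟩ :=
    foldl_scan_spec (a :: t) a
  set A := (a :: t).foldl (fun maximum volume => if volume > maximum then volume else maximum) a with hA
  have hAmem' : A ∈ (a :: t) := by
    rcases hAmem with h | h
    · rw [h]; exact List.mem_cons_self
    · exact h
  have h1 : A ≤ s.getLast hsne := hBmax A hAmem'
  have h2 : s.getLast hsne ≤ A := hAmax _ hBmem
  omega
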